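-- pv_equiv track=rewrite | github.com/yuvalgrin/AdvancedAlgebra | models/matrix_convertion.py | modulu_polynom
-- ===== SOURCE A (Python) =====
-- from typing import List
--
-- def polynom_mul(pol1: List[int], pol2: List[int]):
--     """Multiply two polynoms element by element"""
--     new_pol = [0 for _ in range(len(pol1) + len(pol2) - 1)]
--     for idx1, i1 in enumerate(pol1):
--         for idx2, i2 in enumerate(pol2):
--             new_pol[idx1 + idx2] += int(i1) * int(i2)
--     return new_pol
--
-- def polynom_plus(pol1: List[int], pol2: List[int]):
--     """Add two polynoms element by element"""
--     new_pol = [0 for _ in range(max(len(pol1), len(pol2)))]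
--     for idx, i in enumerate(pol2[-1::-1]):
--         new_pol[-(idx + 1)] += i
--     for idx, i in enumerate(pol1[-1::-1]):
--         new_pol[-(idx + 1)] += i
--     return new_pol
--
-- def polynom_minus(pol: List[int]):
--     """Multiply a polynom by -1"""
--     return [-x for x in pol]
--
-- def polynom_subtract(pol1: List[int], pol2: List[int]):
--     """Subtraction of two polynoms (uses the addition and minus operations)"""
--     return polynom_plus(pol1, polynom_minus(pol2))
--
-- def modulu_polynom(input_polynom: List[int], reduction_polynom: List[int]):
--     """Modulu a polynom with a reduction polynom.
--     If the rank(polynom) > rank(reduction polynom):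
--         # example rank(x^3 + x) > rank(x^2 + 2)
--         Reduce every x^n | n>r, where r = rank(reduction polynom), by representing it as x^r * x^(n-r).
--         * This is helps us because we know how to reduce x^r.
--         Finally, we get somthing like x^(n-r) * (-a_r*x^(r-1)-...- a_1*x -a_0)
--
--     * Reduce x^r: reduction polynom = 0(modulo reduction polynom) = x^r + a_r * x^(r-1) + ... + a_1 * x^0
--     Thus, x^r = - (a_r * x^(r-1) + ... + a_1 * x^0) (modulo reduction polynom)
--     """
--     while len(input_polynom) >= len(reduction_polynom):
--         reduction_amplifier = [
--             input_polynom[0] if idx == 0 else 0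
--             for idx, _ in enumerate(
--                 range(1 + len(input_polynom) - len(reduction_polynom))
--             )
--         ]
--         amplifier_mult = polynom_mul(reduction_amplifier, reduction_polynom[1:])
--         input_polynom = polynom_subtract(input_polynom, amplifier_mult)
--         input_polynom = input_polynom[1:]
--     return input_polynom
-- ===== SOURCE B (Python) =====
-- def modulu_polynom(input_polynom, reduction_polynom):
--     """In-place long division: one pass over the coefficients, subtracting
--     c * reduction_polynom[1:] directly instead of building a zero-padded
--     amplifier polynomial and a full polynomial multiplication each step."""
--     m = len(reduction_polynom)
--     n = len(input_polynom)
--     work = list(input_polynom)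
--     for s in range(n + 1 - m):
--         c = work[s]
--         for j in range(1, m):
--             work[s + j] -= c * reduction_polynom[j]
--     return work[n + 1 - m:] if n >= m else work
-- ===== Notes on version B (the rewrite author's own statement) =====
-- stated objective: faster
-- what changed: Replaces each loop step's zero-padded amplifier construction, full polynomial multiplication and generic right-aligned addition by one in-place long-division pass that subtracts c * reduction_polynom[1:] directly at offset s.
-- outside the precondition, e.g. on modulu_polynom([1], []): A raises IndexError, B raises IndexError
import Mathlib
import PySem

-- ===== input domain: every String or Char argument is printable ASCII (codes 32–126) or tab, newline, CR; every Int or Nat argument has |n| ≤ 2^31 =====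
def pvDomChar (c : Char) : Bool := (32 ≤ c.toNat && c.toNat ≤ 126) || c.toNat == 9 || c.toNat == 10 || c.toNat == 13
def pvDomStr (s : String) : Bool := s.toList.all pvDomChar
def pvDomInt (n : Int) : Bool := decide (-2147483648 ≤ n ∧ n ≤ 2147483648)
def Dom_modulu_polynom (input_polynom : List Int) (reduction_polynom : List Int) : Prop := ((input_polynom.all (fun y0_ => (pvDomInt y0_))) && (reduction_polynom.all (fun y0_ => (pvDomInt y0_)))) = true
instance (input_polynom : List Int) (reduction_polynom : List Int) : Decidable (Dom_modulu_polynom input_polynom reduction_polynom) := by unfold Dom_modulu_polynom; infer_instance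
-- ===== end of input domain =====

-- B replaces A's per-step zero-padded amplifier multiplication + generic right-aligned
-- addition by one in-place long-division pass that subtracts c * reduction_polynom[1:]
-- directly; objective: faster (A redoes an O(n·m) multiply per step, B does O(m) work per step).

-- ===== PORT A =====

-- polynom_mul: new_pol[idx1+idx2] += int(i1) * int(i2)  (int() on an int is the identity)
def polynom_mul (pol1 : List Int) (pol2 : List Int) : List Int :=
  let new_pol := List.replicate (pol1.length + pol2.length - 1) (0 : Int)
  (PySem.List.enumerate pol1 0).foldl (fun np p1 =>
    (PySem.List.enumerate pol2 0).foldl (fun np2 p2 =>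
      PySem.List.pySetD np2 (p1.1 + p2.1)
        (PySem.List.pyGetD np2 (p1.1 + p2.1) 0 + p1.2 * p2.2)) np) new_pol
  -- the index idx1+idx2 is always < len(new_pol), so pyGetD/pySetD are exact here

-- polynom_plus: pol[-1::-1] is the full reverse of pol; new_pol[-(idx+1)] += i.
-- The negative index -(idx+1) is always in range (idx < len(pol) ≤ len(new_pol)), so pyGetD/pySetD are exact.
def polynom_plus (pol1 : List Int) (pol2 : List Int) : List Int :=
  let new_pol := List.replicate (max pol1.length pol2.length) (0 : Int)
  let np1 := (PySem.List.enumerate ((PySem.List.slice? pol2 (some (-1)) none (-1)).getD []) 0).foldl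
      (fun np p => PySem.List.pySetD np (-(p.1 + 1)) (PySem.List.pyGetD np (-(p.1 + 1)) 0 + p.2)) new_pol
  (PySem.List.enumerate ((PySem.List.slice? pol1 (some (-1)) none (-1)).getD []) 0).foldl
      (fun np p => PySem.List.pySetD np (-(p.1 + 1)) (PySem.List.pyGetD np (-(p.1 + 1)) 0 + p.2)) np1

def polynom_minus (pol : List Int) : List Int := pol.map (fun x => -x)

def polynom_subtract (pol1 : List Int) (pol2 : List Int) : List Int :=
  polynom_plus pol1 (polynom_minus pol2)

-- length facts cited by the termination proof of modulu_polynom (port A)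
theorem pv_foldl_length_fix {α : Type} (f : List Int → α → List Int)
    (h : ∀ w x, (f w x).length = w.length) :
    ∀ (l : List α) (w : List Int), (l.foldl f w).length = w.length := by
  intro l
  induction l with
  | nil => intro w; rfl
  | cons x xs ih => intro w; simp only [List.foldl_cons]; rw [ih, h]

theorem length_polynom_mul (p q : List Int) :
    (polynom_mul p q).length = p.length + q.length - 1 := by
  unfold polynom_mul
  rw [pv_foldl_length_fix _ (fun w x => pv_foldl_length_fix _ (fun w2 y => PySem.List.length_pySetD _ _ _) _ w)]
  simp

theorem length_polynom_plus (p q : List Int) :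
    (polynom_plus p q).length = max p.length q.length := by
  unfold polynom_plus
  rw [pv_foldl_length_fix _ (fun w x => PySem.List.length_pySetD _ _ _),
      pv_foldl_length_fix _ (fun w x => PySem.List.length_pySetD _ _ _)]
  simp

theorem length_polynom_subtract (p q : List Int) :
    (polynom_subtract p q).length = max p.length q.length := by
  unfold polynom_subtract polynom_minus
  rw [length_polynom_plus]; simp

def modulu_polynom (input_polynom : List Int) (reduction_polynom : List Int) : List Int :=
  if _h : reduction_polynom.length ≤ input_polynom.length then
    match input_polynom with
    | [] => []   -- Python raises IndexError on input_polynom[0] here (reachable only with reduction_polynom = [], excluded by Pre_)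
    | c :: rest =>
      -- reduction_amplifier = [input_polynom[0] if idx == 0 else 0 for idx, _ in enumerate(range(1 + len(input) - len(red)))]
      let amplifier := (PySem.List.pyRange 0 (1 + ((c :: rest).length : Int) - (reduction_polynom.length : Int)) 1).map
          (fun idx => if idx = 0 then c else (0 : Int))
      let amplifier_mult := polynom_mul amplifier (PySem.List.slice reduction_polynom (some 1) none)
      modulu_polynom (PySem.List.slice (polynom_subtract (c :: rest) amplifier_mult) (some 1) none) reduction_polynom
  else input_polynom
termination_by input_polynom.length
decreasing_by
  simp only [PySem.List.slice_from_one, List.length_tail, length_polynom_subtract,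
    length_polynom_mul, List.length_map, PySem.List.pyRange_one, List.length_range]
  simp only [List.length_cons] at _h ⊢
  omega

-- ===== PORT B =====

-- one outer-loop step of Source B: c = work[s]; for j in range(1, m): work[s+j] -= c * reduction_polynom[j]
-- (s and s+j are always in range when reduction_polynom ≠ [] (Pre_), so getD/set are exact here; j < m keeps rp.getD exact)
def bStep (reduction_polynom : List Int) (work : List Int) (s : Nat) : List Int :=
  let c := work.getD s 0
  (List.range' 1 (reduction_polynom.length - 1)).foldl
    (fun w j => w.set (s + j) (w.getD (s + j) 0 - c * reduction_polynom.getD j 0)) work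

def modulu_polynom_alt (input_polynom : List Int) (reduction_polynom : List Int) : List Int :=
  let m := reduction_polynom.length
  let n := input_polynom.length
  let work := (List.range (n + 1 - m)).foldl (bStep reduction_polynom) input_polynom
  -- work[n + 1 - m:] (the slice index is ≥ 0 under the guard n ≥ m)
  if m ≤ n then work.drop (n + 1 - m) else work

-- ===== PRECONDITION & SPEC =====

-- Pre_ excludes only reduction_polynom = [], on which Python A always raises IndexError.
def Pre_modulu_polynom (input_polynom : List Int) (reduction_polynom : List Int) : Prop :=
  reduction_polynom ≠ []
instance (input_polynom : List Int) (reduction_polynom : List Int) : Decidable (Pre_modulu_polynom input_polynom reduction_polynom) := by unfold Pre_modulu_polynom; infer_instance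

def pvWitness_modulu_polynom : List Int × List Int := ([2, 0, 0, 1, 5], [1, 0, 1])

def Spec_modulu_polynom (input_polynom : List Int) (reduction_polynom : List Int) (out : List Int) : Prop := out = modulu_polynom_alt input_polynom reduction_polynom
instance (input_polynom : List Int) (reduction_polynom : List Int) (out : List Int) : Decidable (Spec_modulu_polynom input_polynom reduction_polynom out) := by unfold Spec_modulu_polynom; infer_instance

-- ===== CLAIM (what is proved, stated in full; the proofs are below) =====
def Claim_equal_modulu_polynom : Prop := ∀ (input_polynom : List Int) (reduction_polynom : List Int), Dom_modulu_polynom input_polynom reduction_polynom → Pre_modulu_polynom input_polynom reduction_polynom → Spec_modulu_polynom input_polynom reduction_polynom (modulu_polynom input_polynom reduction_polynom)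

-- ===== LEMMAS AND PROOFS =====

-- the common one-reduction-step value: subtract c * rp[1:] from the first m-1 entries of rest
def redStep (rp : List Int) (c : Int) (rest : List Int) : List Int :=
  (List.range (rp.length - 1)).map (fun i => rest.getD i 0 - c * rp.getD (i + 1) 0)
    ++ rest.drop (rp.length - 1)

theorem pv_getD_drop (w : List Int) (s k : Nat) (d : Int) :
    (w.drop s).getD k d = w.getD (s + k) d := by
  simp [List.getD_eq_getElem?_getD, List.getElem?_drop]

theorem pv_pySetD_neg (xs : List Int) (k : Nat) (v : Int) (h1 : 0 < k) (h2 : k ≤ xs.length) :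
    PySem.List.pySetD xs (-(k : Int)) v = xs.set (xs.length - k) v := by
  simp [pysem, PySem.List.pySetD, PySem.List.pySet?, PySem.List.pyIdx?]
  split_ifs with h h'
  all_goals first
    | exact absurd h (by omega)
    | simp

theorem pv_revSlice (xs : List Int) :
    (PySem.List.slice? xs (some (-1)) none (-1)).getD [] = xs.reverse := by
  have h : PySem.List.sliceIndices xs.length (some (-1)) none (-1)
      = PySem.List.sliceIndices xs.length none none (-1) := by
    simp [PySem.List.sliceIndices]
    omega
  have h2 : PySem.List.slice? xs (some (-1)) none (-1) = PySem.List.slice? xs none none (-1) := by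
    unfold PySem.List.slice?
    rw [h]
  rw [h2, PySem.List.slice?_none_none_neg_one]
  rfl

theorem pv_amp_eq (c : Int) (K : Nat) (hK : 0 < K) :
    (PySem.List.pyRange 0 (K : Int) 1).map (fun idx => if idx = 0 then c else (0 : Int))
      = c :: List.replicate (K - 1) 0 := by
  obtain ⟨K', rfl⟩ : ∃ K', K = K' + 1 := ⟨K - 1, by omega⟩
  rw [PySem.List.pyRange_one]
  simp only [sub_zero, Int.toNat_natCast, List.map_map, List.range_succ_eq_map]
  simp only [List.map_cons, List.map_map, Function.comp_apply, Nat.cast_zero, add_zero,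
    zero_add, if_pos rfl]
  congr 1
  have hcongr : ∀ k ∈ List.range K',
      (((fun idx => if idx = (0:Int) then c else 0) ∘ fun k : Nat => (k:Int)) ∘ Nat.succ) k
        = (fun _ => (0:Int)) k := by
    intro k _
    simp
    intro h
    omega
  rw [List.map_congr_left hcongr, List.map_const']
  simp

theorem pv_rowE (g : Int → Int → Int) :
    ∀ (q : List Int) (k a : Nat) (w : List Int), a + k + q.length ≤ w.length →
    (PySem.List.enumerate q (k : Int)).foldl
      (fun np p => PySem.List.pySetD np ((a : Int) + p.1)
        (g (PySem.List.pyGetD np ((a : Int) + p.1) 0) p.2)) w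
    = w.take (a + k) ++ List.zipWith g ((w.drop (a + k)).take q.length) q
      ++ w.drop (a + k + q.length) := by
  intro q
  induction q with
  | nil =>
    intro k a w h
    simp [PySem.List.enumerate_nil, List.take_append_drop]
  | cons x q ih =>
    intro k a w h
    simp only [List.length_cons] at h ⊢
    have hak : a + k < w.length := by omega
    rw [PySem.List.enumerate_cons]
    simp only [List.foldl_cons]
    have hcast : (a : Int) + ((k : Nat) : Int) = ((a + k : Nat) : Int) := by push_cast; ring
    have hcast2 : ((k : Nat) : Int) + 1 = ((k + 1 : Nat) : Int) := by push_cast; ring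
    simp only [hcast, hcast2, PySem.List.pySetD_natCast, PySem.List.pyGetD_natCast]
    rw [ih (k + 1) a (w.set (a + k) (g (w.getD (a + k) 0) x)) (by simp only [List.length_set]; omega)]
    have e2 : (w.set (a + k) (g (w.getD (a + k) 0) x)).take (a + (k + 1))
        = w.take (a + k) ++ [g (w.getD (a + k) 0) x] := by
      rw [show a + (k + 1) = (a + k) + 1 by omega, List.take_succ,
        List.take_set_of_le (Nat.le_refl _), List.getElem?_set_self hak]
      rfl
    have e3 : ∀ j, a + k + 1 ≤ j → (w.set (a + k) (g (w.getD (a + k) 0) x)).drop j = w.drop j := by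
      intro j hj
      rw [List.drop_set, if_pos (by omega)]
    rw [e2, show a + (k + 1) = a + k + 1 by omega, e3 _ (Nat.le_refl _),
      e3 _ (by omega : a + k + 1 ≤ a + k + 1 + q.length)]
    rw [List.drop_eq_getElem_cons hak, List.take_succ_cons, List.zipWith_cons_cons,
      List.getD_eq_getElem w 0 hak]
    simp only [List.append_assoc, List.cons_append, List.nil_append]
    rw [show a + k + (q.length + 1) = a + k + 1 + q.length by omega]

theorem pv_zipWith_add_zero_mul (l q : List Int) (h : l.length ≤ q.length) :
    List.zipWith (fun x y => x + 0 * y) l q = l := by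
  induction l generalizing q with
  | nil => simp
  | cons x l ih => cases q with
    | nil => simp at h
    | cons y q => simp_all

theorem pv_zeroRows (q : List Int) :
    ∀ (t s : Nat) (w : List Int), s + t + q.length ≤ w.length + 1 →
    (PySem.List.enumerate (List.replicate t (0 : Int)) (s : Int)).foldl
      (fun np p1 => (PySem.List.enumerate q 0).foldl
        (fun np2 p2 => PySem.List.pySetD np2 (p1.1 + p2.1)
          (PySem.List.pyGetD np2 (p1.1 + p2.1) 0 + p1.2 * p2.2)) np) w = w := by
  intro t
  induction t with
  | zero => intro s w h; simp [PySem.List.enumerate_nil]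
  | succ t ih =>
    intro s w h
    rw [List.replicate_succ, PySem.List.enumerate_cons]
    simp only [List.foldl_cons]
    have h' : s + 0 + q.length ≤ w.length := by omega
    have hrow := pv_rowE (fun x y => x + 0 * y) q 0 s w h'
    simp only [Nat.cast_zero] at hrow
    rw [hrow]
    have hlen : ((w.drop (s + 0)).take q.length).length ≤ q.length := by simp
    rw [pv_zipWith_add_zero_mul _ _ hlen]
    simp only [Nat.add_zero]
    rw [← List.drop_drop, List.append_assoc, List.take_append_drop, List.take_append_drop]
    rw [show ((s : Nat) : Int) + 1 = ((s + 1 : Nat) : Int) by push_cast; ring]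
    exact ih (s + 1) w (by omega)

theorem pv_zipWith_zero_cmul (c : Int) (q : List Int) :
    ∀ (L : Nat), q.length ≤ L →
    List.zipWith (fun x y => x + c * y) (List.replicate L (0 : Int)) q = q.map (fun y => c * y) := by
  induction q with
  | nil => simp
  | cons y q ih =>
    intro L hL
    cases L with
    | zero => simp at hL
    | succ L =>
      simp only [List.replicate_succ, List.zipWith_cons_cons, zero_add, List.map_cons]
      rw [ih L (by simpa using hL)]

theorem pv_mul_amp (c : Int) (t : Nat) (q : List Int) :
    polynom_mul (c :: List.replicate t 0) q = q.map (fun x => c * x) ++ List.replicate t 0 := by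
  unfold polynom_mul
  simp only [List.length_cons, List.length_replicate]
  rw [show t + 1 + q.length - 1 = t + q.length by omega]
  rw [PySem.List.enumerate_cons]
  simp only [List.foldl_cons]
  have h1 : 0 + 0 + q.length ≤ (List.replicate (t + q.length) (0 : Int)).length := by simp
  have hrow := pv_rowE (fun x y => x + c * y) q 0 0 (List.replicate (t + q.length) (0 : Int)) h1
  simp only [Nat.cast_zero] at hrow
  rw [hrow]
  simp only [Nat.add_zero, Nat.zero_add, Nat.sub_zero, List.take_replicate, List.drop_replicate,
    List.take_zero, List.drop_zero, List.nil_append, Nat.zero_min, List.replicate_zero]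
  rw [show min q.length (t + q.length) = q.length by omega,
    pv_zipWith_zero_cmul c q q.length (le_refl _),
    show t + q.length - q.length = t by omega]
  have hz := pv_zeroRows q t 1 (q.map (fun y => c * y) ++ List.replicate t 0)
    (by simp; omega)
  simp only [Nat.cast_one] at hz
  rw [show (0 : Int) + 1 = 1 by ring]
  exact hz

theorem pv_addBackAux (pol : List Int) :
    ∀ (k : Nat) (base : List Int), k + pol.length ≤ base.length →
    (PySem.List.enumerate pol.reverse (k : Int)).foldl
      (fun np p => PySem.List.pySetD np (-(p.1 + 1)) (PySem.List.pyGetD np (-(p.1 + 1)) 0 + p.2)) base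
    = base.take (base.length - k - pol.length)
      ++ List.zipWith (· + ·) ((base.drop (base.length - k - pol.length)).take pol.length) pol
      ++ base.drop (base.length - k) := by
  induction pol using List.reverseRecOn with
  | nil =>
    intro k base h
    simp [PySem.List.enumerate_nil, List.take_append_drop]
  | append_singleton ps a ih =>
    intro k base h
    simp only [List.length_append, List.length_singleton] at h
    have hk2 : k + 1 ≤ base.length := by omega
    have hjlt : base.length - (k + 1) < base.length := by omega
    simp only [List.reverse_append, List.reverse_singleton, List.singleton_append]
    rw [PySem.List.enumerate_cons]
    simp only [List.foldl_cons]
    simp only [List.length_append, List.length_singleton]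
    rw [show -((k : Int) + 1) = -(((k + 1 : Nat)) : Int) by push_cast; ring]
    rw [pv_pySetD_neg base (k + 1) _ (by omega) hk2,
      PySem.List.pyGetD_neg_natCast base (k + 1) 0 (Nat.succ_pos k) hk2]
    rw [show ((k : Int) + 1) = ((k + 1 : Nat) : Int) by push_cast; ring]
    rw [ih (k + 1) (base.set (base.length - (k + 1)) (base[base.length - (k + 1)] + a))
      (by simp only [List.length_set]; omega)]
    simp only [List.length_set]
    set j := base.length - (k + 1) with hj
    set v := base[j] + a with hv
    set a0 := base.length - k - (ps.length + 1) with ha0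
    have e0 : base.length - (k + 1) - ps.length = a0 := by omega
    have e1 : (base.set j v).take a0 = base.take a0 := List.take_set_of_le (by omega)
    have e2 : ((base.set j v).drop a0).take ps.length = (base.drop a0).take ps.length := by
      rw [List.drop_set, if_neg (by omega)]
      rw [show j - a0 = ps.length by omega]
      exact List.take_set_of_le (Nat.le_refl _)
    have e3 : (base.set j v).drop (base.length - (k + 1)) = v :: base.drop (base.length - k) := by
      rw [List.drop_set, if_neg (by omega), show j - (base.length - (k + 1)) = 0 by omega,
        List.drop_eq_getElem_cons hjlt, List.set_cons_zero,
        show base.length - (k + 1) + 1 = base.length - k by omega]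
    rw [e0, e1, e2, e3]
    have e4 : (base.drop a0).take (ps.length + 1) = (base.drop a0).take ps.length ++ [base[j]] := by
      rw [List.take_succ]
      congr
      rw [List.getElem?_drop, show a0 + ps.length = j by omega,
        List.getElem?_eq_getElem hjlt]
      rfl
    rw [e4, List.zipWith_append (by rw [List.length_take, List.length_drop]; omega)]
    simp [hv]

theorem pv_zipWith_zero_add (q : List Int) :
    ∀ (L : Nat), q.length ≤ L →
    List.zipWith (· + ·) (List.replicate L (0 : Int)) q = q := by
  induction q with
  | nil => simp
  | cons y q ih =>
    intro L hL
    cases L with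
    | zero => simp at hL
    | succ L =>
      simp only [List.replicate_succ, List.zipWith_cons_cons, zero_add]
      rw [ih L (by simpa using hL)]

theorem pv_plus_eq (c : Int) (rest p2 : List Int) (h : p2.length = rest.length) :
    polynom_plus (c :: rest) p2 = c :: List.zipWith (· + ·) p2 rest := by
  unfold polynom_plus
  rw [pv_revSlice, pv_revSlice]
  simp only [List.length_cons]
  rw [show max (rest.length + 1) p2.length = rest.length + 1 by omega]
  have h1 := pv_addBackAux p2 0 (List.replicate (rest.length + 1) (0 : Int)) (by simp; omega)
  simp only [Nat.cast_zero] at h1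
  rw [h1]
  simp only [List.length_replicate, Nat.sub_zero, List.take_replicate, List.drop_replicate]
  rw [show min (rest.length + 1 - p2.length) (rest.length + 1) = 1 by omega,
    show rest.length + 1 - p2.length = 1 by omega,
    show min p2.length (rest.length + 1 - 1) = p2.length by omega,
    pv_zipWith_zero_add p2 p2.length (le_refl _),
    show rest.length + 1 - (rest.length + 1) = 0 by omega]
  simp only [List.replicate_zero, List.replicate_one, List.append_nil, List.singleton_append]
  have h2 := pv_addBackAux (c :: rest) 0 (0 :: p2) (by simp; omega)
  simp only [Nat.cast_zero] at h2
  rw [h2]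
  simp only [List.length_cons, Nat.sub_zero, h]
  rw [show rest.length + 1 - (rest.length + 1) = 0 by omega]
  simp only [List.take_zero, List.drop_zero, List.nil_append]
  rw [List.take_of_length_le (by simp [h]), List.drop_eq_nil_of_le (by simp [h])]
  simp

theorem pv_stepA (rp : List Int) (c : Int) (rest : List Int)
    (hm : rp ≠ []) (hlen : rp.length ≤ rest.length + 1) :
    PySem.List.slice (polynom_subtract (c :: rest)
      (polynom_mul ((PySem.List.pyRange 0 (1 + (((c :: rest).length : Nat) : Int) - ((rp.length : Nat) : Int)) 1).map
          (fun idx => if idx = 0 then c else (0 : Int)))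
        (PySem.List.slice rp (some 1) none))) (some 1) none
    = redStep rp c rest := by
  have hm1 : 1 ≤ rp.length := List.length_pos_of_ne_nil hm
  rw [PySem.List.slice_from_one rp]
  rw [show (1 + (((c :: rest).length : Nat) : Int) - ((rp.length : Nat) : Int))
      = ((rest.length + 2 - rp.length : Nat) : Int) by simp; omega]
  rw [pv_amp_eq c (rest.length + 2 - rp.length) (by omega),
    show rest.length + 2 - rp.length - 1 = rest.length + 1 - rp.length by omega,
    pv_mul_amp]
  unfold polynom_subtract polynom_minus
  rw [pv_plus_eq c rest _ (by simp [List.length_tail]; omega)]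
  rw [PySem.List.slice_from_one]
  simp only [List.tail_cons, List.map_append]
  have hsplit := List.zipWith_append (f := (· + ·))
    (l₁ := (rp.tail.map (fun x => c * x)).map (fun x => -x))
    (l₁' := (List.replicate (rest.length + 1 - rp.length) (0:Int)).map (fun x => -x))
    (l₂ := rest.take (rp.length - 1)) (l₂' := rest.drop (rp.length - 1)) (by simp; omega)
  rw [List.take_append_drop] at hsplit
  rw [hsplit]
  have e1 : List.zipWith (· + ·) ((List.replicate (rest.length + 1 - rp.length) (0:Int)).map (fun x => -x))
      (rest.drop (rp.length - 1)) = rest.drop (rp.length - 1) := by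
    rw [List.map_replicate]
    simp only [neg_zero]
    exact pv_zipWith_zero_add _ _ (by simp; omega)
  rw [e1]
  unfold redStep
  congr 1
  apply List.ext_getElem (by simp; omega)
  intro i hi1 hi2
  simp only [List.getElem_zipWith, List.getElem_map, List.getElem_take, List.getElem_range]
  simp only [List.length_zipWith, List.length_map, List.length_take, List.length_tail] at hi1
  have hirest : i < rest.length := by omega
  have hirp : i + 1 < rp.length := by omega
  rw [List.getElem_tail, List.getD_eq_getElem rest 0 hirest, List.getD_eq_getElem rp 0 hirp]
  ring

theorem pv_rowRange (f : Nat → Int → Int) :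
    ∀ (t k a : Nat) (w : List Int), a + k + t ≤ w.length →
    (List.range' k t).foldl (fun w2 j => w2.set (a + j) (f j (w2.getD (a + j) 0))) w
    = w.take (a + k) ++ (List.range' k t).map (fun j => f j (w.getD (a + j) 0))
      ++ w.drop (a + k + t) := by
  intro t
  induction t with
  | zero => intro k a w h; simp [List.take_append_drop]
  | succ t ih =>
    intro k a w h
    have hak : a + k < w.length := by omega
    rw [List.range'_succ]
    simp only [List.foldl_cons, List.map_cons]
    rw [ih (k + 1) a (w.set (a + k) (f k (w.getD (a + k) 0))) (by simp only [List.length_set]; omega)]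
    have e2 : (w.set (a + k) (f k (w.getD (a + k) 0))).take (a + (k + 1))
        = w.take (a + k) ++ [f k (w.getD (a + k) 0)] := by
      rw [show a + (k + 1) = (a + k) + 1 by omega, List.take_succ,
        List.take_set_of_le (Nat.le_refl _), List.getElem?_set_self hak]
      rfl
    have e3 : ∀ j, a + k + 1 ≤ j → (w.set (a + k) (f k (w.getD (a + k) 0))).drop j = w.drop j := by
      intro j hj
      rw [List.drop_set, if_pos (by omega)]
    have e4 : (List.range' (k + 1) t).map (fun j => f j ((w.set (a + k) (f k (w.getD (a + k) 0))).getD (a + j) 0))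
        = (List.range' (k + 1) t).map (fun j => f j (w.getD (a + j) 0)) := by
      apply List.map_congr_left
      intro j hj
      rw [List.mem_range'] at hj
      obtain ⟨i, _, rfl⟩ := hj
      simp only [List.getD_eq_getElem?_getD]
      rw [List.getElem?_set_ne (by omega)]
    rw [e2, e4, show a + (k + 1) = a + k + 1 by omega,
      e3 _ (by omega : a + k + 1 ≤ a + k + 1 + t)]
    simp only [List.append_assoc, List.cons_append, List.nil_append]
    rw [show a + k + (t + 1) = a + k + 1 + t by omega]

theorem pv_bStep_drop (rp w : List Int) (s : Nat) (c : Int) (rest : List Int)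
    (hv : w.drop s = c :: rest) (hm : rp.length ≤ rest.length + 1) (h1 : rp ≠ []) :
    (bStep rp w s).drop (s + 1) = redStep rp c rest := by
  have hm1 : 1 ≤ rp.length := List.length_pos_of_ne_nil h1
  have hwl : w.length - s = rest.length + 1 := by
    rw [← List.length_drop, hv]
    simp
  have hsw : s + rest.length + 1 ≤ w.length := by omega
  unfold bStep
  have hc : w.getD s 0 = c := by
    have := congrArg (fun l => l.getD 0 0) hv
    simp only at this
    rw [pv_getD_drop] at this
    simpa using this
  simp only [hc]
  rw [pv_rowRange (fun j x => x - c * rp.getD j 0) (rp.length - 1) 1 s w (by omega)]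
  rw [List.append_assoc, List.drop_left' (by simp; omega)]
  congr 1
  · rw [List.range'_eq_map_range, List.map_map]
    apply List.map_congr_left
    intro i hi
    rw [List.mem_range] at hi
    simp only [Function.comp_apply]
    rw [show s + (1 + i) = s + (1 + i) by rfl]
    have : w.getD (s + (1 + i)) 0 = rest.getD i 0 := by
      rw [← pv_getD_drop, hv, show 1 + i = i + 1 by omega]
      simp [List.getD_eq_getElem?_getD]
    rw [this, show 1 + i = i + 1 by omega]
  · rw [show s + 1 + (rp.length - 1) = s + rp.length by omega, ← List.drop_drop, hv,
      show rp.length = (rp.length - 1) + 1 by omega, List.drop_succ_cons]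
    simp only [Nat.add_sub_cancel]

theorem pv_redStep_length (rp : List Int) (c : Int) (rest : List Int)
    (h : rp.length - 1 ≤ rest.length) :
    (redStep rp c rest).length = rest.length := by
  unfold redStep; simp; omega

theorem pv_loopB (rp : List Int) (hrp : rp ≠ []) :
    ∀ (N : Nat) (v : List Int), v.length ≤ N → ∀ (s : Nat) (w : List Int), w.drop s = v →
    ((List.range' s (v.length + 1 - rp.length)).foldl (bStep rp) w).drop (s + (v.length + 1 - rp.length))
    = modulu_polynom v rp := by
  have hm1 : 1 ≤ rp.length := List.length_pos_of_ne_nil hrp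
  intro N
  induction N with
  | zero =>
    intro v hv s w hw
    have hvnil : v = [] := List.eq_nil_of_length_eq_zero (by omega)
    subst hvnil
    rw [show ([] : List Int).length + 1 - rp.length = 0 by simp; omega]
    simp only [List.range'_zero, List.foldl_nil, Nat.add_zero]
    rw [hw, modulu_polynom, dif_neg (by simp; omega)]
  | succ N ih =>
    intro v hv s w hw
    by_cases hc : rp.length ≤ v.length
    · obtain ⟨cc, rest, rfl⟩ : ∃ cc rest, v = cc :: rest := by
        cases v with
        | nil => exact absurd hc (by simp only [List.length_nil]; omega)
        | cons cc rest => exact ⟨cc, rest, rfl⟩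
      simp only [List.length_cons] at hc hv ⊢
      rw [show rest.length + 1 + 1 - rp.length = (rest.length + 1 - rp.length) + 1 by omega,
        List.range'_succ]
      simp only [List.foldl_cons]
      have hdrop1 : (bStep rp w s).drop (s + 1) = redStep rp cc rest :=
        pv_bStep_drop rp w s cc rest hw (by omega) hrp
      have hrsl : (redStep rp cc rest).length = rest.length :=
        pv_redStep_length rp cc rest (by omega)
      have hih := ih (redStep rp cc rest) (by omega) (s + 1) (bStep rp w s) hdrop1
      rw [hrsl] at hih
      rw [show s + (rest.length + 1 - rp.length + 1) = (s + 1) + (rest.length + 1 - rp.length) by omega]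
      rw [hih]
      have hA : modulu_polynom (cc :: rest) rp
          = modulu_polynom (PySem.List.slice (polynom_subtract (cc :: rest)
              (polynom_mul ((PySem.List.pyRange 0 (1 + (((cc :: rest).length : Nat) : Int) - ((rp.length : Nat) : Int)) 1).map
                (fun idx => if idx = 0 then cc else (0 : Int)))
              (PySem.List.slice rp (some 1) none))) (some 1) none) rp := by
        rw [modulu_polynom, dif_pos (show rp.length ≤ (cc :: rest).length by simp; omega)]
      rw [hA, pv_stepA rp cc rest hrp (by omega)]
    · rw [show v.length + 1 - rp.length = 0 by omega]
      simp only [List.range'_zero, List.foldl_nil, Nat.add_zero]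
      rw [hw, modulu_polynom, dif_neg hc]

-- ===== VERDICT (by name: the statement is the Claim_ definition above) =====
theorem modulu_polynom_spec : Claim_equal_modulu_polynom := by
  unfold Claim_equal_modulu_polynom
  intro ip rp _hdom hpre
  unfold Spec_modulu_polynom modulu_polynom_alt
  show modulu_polynom ip rp
    = if rp.length ≤ ip.length then
        ((List.range (ip.length + 1 - rp.length)).foldl (bStep rp) ip).drop (ip.length + 1 - rp.length)
      else (List.range (ip.length + 1 - rp.length)).foldl (bStep rp) ip
  rw [List.range_eq_range']
  have hloop := pv_loopB rp hpre ip.length ip (le_refl _) 0 ip (by simp)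
  simp only [Nat.zero_add] at hloop
  by_cases hc : rp.length ≤ ip.length
  · rw [if_pos hc, hloop]
  · rw [if_neg hc]
    rw [show ip.length + 1 - rp.length = 0 by omega]
    simp only [List.range'_zero, List.foldl_nil]
    rw [modulu_polynom, dif_neg hc]
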